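-- pv_equiv track=rewrite | github.com/AI-Lab-2025-2-3rd/ai-project-atlanta | RL3.py | _split_routes_from_path
-- ===== SOURCE A (Python) =====
-- def _split_routes_from_path(path_indices):
--     # path 예: [0, 22, 16, 24, 21, 15, 0, 68, 73, ... , 0]
--     routes = []
--     cur = []
--     for idx in path_indices:
--         if idx == 0:
--             if cur:
--                 routes.append(cur)
--                 cur = []
--             # DEPOT은 루트 경계 표시만: 내부에 넣지 않음
--         else:
--             cur.append(idx)
--     if cur:  # 마지막에 DEPOT으로 끝나지 않은 경우 보정
--         routes.append(cur)
--     return routes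
-- ===== SOURCE B (Python) =====
-- def _split_routes_from_path(path_indices):
--     # Segment the path into maximal runs of non-depot nodes: skip depots,
--     # then slice out the run up to the next depot in one inner scan.
--     routes = []
--     rest = path_indices
--     while rest:
--         if rest[0] == 0:
--             rest = rest[1:]
--         else:
--             j = 0
--             while j < len(rest) and rest[j] != 0:
--                 j += 1
--             routes.append(rest[:j])
--             rest = rest[j:]
--     return routes
-- ===== Notes on version B (the rewrite author's own statement) =====
-- stated objective: alternative
-- what changed: B segments the path into maximal non-zero runs by skip-depot/scan-to-next-depot slicing instead of A's element-by-element accumulator with flush-on-zero logic.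
import Mathlib
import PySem

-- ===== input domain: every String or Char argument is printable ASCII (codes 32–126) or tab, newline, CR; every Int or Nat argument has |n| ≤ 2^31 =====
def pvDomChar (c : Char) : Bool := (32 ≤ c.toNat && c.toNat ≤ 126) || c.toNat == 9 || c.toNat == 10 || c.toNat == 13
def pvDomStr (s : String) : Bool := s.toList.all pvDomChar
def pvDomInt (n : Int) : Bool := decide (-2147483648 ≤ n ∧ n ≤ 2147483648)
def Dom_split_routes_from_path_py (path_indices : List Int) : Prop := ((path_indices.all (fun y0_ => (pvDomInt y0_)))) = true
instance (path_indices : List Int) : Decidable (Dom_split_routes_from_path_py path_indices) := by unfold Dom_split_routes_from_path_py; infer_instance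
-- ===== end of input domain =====

-- B replaces A's accumulator-with-flush loop by skip-depot / scan-to-next-depot run segmentation (alternative decomposition, same cost).

-- ===== PORT A =====
-- the loop body: state = (routes, cur)
def pvLoopA (state : List (List Int) × List Int) (idx : Int) : List (List Int) × List Int :=
  if idx = 0 then
    if state.2 ≠ [] then (state.1 ++ [state.2], []) else state
  else
    (state.1, state.2 ++ [idx])

def split_routes_from_path_py (path_indices : List Int) : List (List Int) :=
  let s := path_indices.foldl pvLoopA ([], [])
  if s.2 ≠ [] then s.1 ++ [s.2] else s.1

-- ===== PORT B =====
-- Source B: while rest: skip a leading 0, else slice off the maximal non-zero run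
-- (rest[:j] with j the inner scan = takeWhile (· ≠ 0), rest[j:] = dropWhile (· ≠ 0))
def split_routes_from_path_py_alt : List Int → List (List Int)
  | [] => []
  | x :: xs =>
    if x = 0 then split_routes_from_path_py_alt xs
    else (x :: xs.takeWhile (· ≠ 0)) :: split_routes_from_path_py_alt (xs.dropWhile (· ≠ 0))
  termination_by l => l.length
  decreasing_by
    · simp
    · simpa using Nat.lt_succ_of_le (List.length_dropWhile_le _ _)

-- ===== PRECONDITION & SPEC =====
def Spec_split_routes_from_path_py (path_indices : List Int) (out : List (List Int)) : Prop := out = split_routes_from_path_py_alt path_indices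
instance (path_indices : List Int) (out : List (List Int)) : Decidable (Spec_split_routes_from_path_py path_indices out) := by unfold Spec_split_routes_from_path_py; infer_instance

-- ===== CLAIM (what is proved, stated in full; the proofs are below) =====
def Claim_equal_split_routes_from_path_py : Prop := ∀ (path_indices : List Int), Dom_split_routes_from_path_py path_indices → Spec_split_routes_from_path_py path_indices (split_routes_from_path_py path_indices)

-- ===== LEMMAS AND PROOFS =====

-- proof-only model of A's fold: current partial route `cur`, remaining input
def pvGoA (cur : List Int) : List Int → List (List Int)
  | [] => if cur = [] then [] else [cur]
  | x :: xs => if x = 0 then (if cur = [] then pvGoA [] xs else cur :: pvGoA [] xs)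
               else pvGoA (cur ++ [x]) xs

lemma pvFoldA_eq_goA (p : List Int) : ∀ (routes : List (List Int)) (cur : List Int),
    (let s := p.foldl pvLoopA (routes, cur); if s.2 ≠ [] then s.1 ++ [s.2] else s.1)
      = routes ++ pvGoA cur p := by
  induction p with
  | nil =>
    intro routes cur
    simp only [List.foldl_nil, pvGoA]
    by_cases h : cur = [] <;> simp [h]
  | cons x xs ih =>
    intro routes cur
    simp only [List.foldl_cons, pvGoA, pvLoopA]
    by_cases hx : x = 0
    · by_cases hc : cur = [] <;> simp [hx, hc, ih]
    · simp [hx, ih]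

lemma pvGoA_eq_alt (p : List Int) : ∀ cur : List Int,
    pvGoA cur p = if cur = [] then split_routes_from_path_py_alt p
      else (cur ++ p.takeWhile (· ≠ 0)) :: split_routes_from_path_py_alt (p.dropWhile (· ≠ 0)) := by
  induction p with
  | nil =>
    intro cur
    by_cases h : cur = [] <;> simp [h, pvGoA, split_routes_from_path_py_alt]
  | cons x xs ih =>
    intro cur
    by_cases hx : x = 0
    · by_cases hc : cur = []
      · simp [pvGoA, hx, hc, ih, split_routes_from_path_py_alt]
      · simp [pvGoA, hx, hc, ih, split_routes_from_path_py_alt]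
    · by_cases hc : cur = []
      · simp [pvGoA, hx, hc, ih, split_routes_from_path_py_alt]
      · simp [pvGoA, hx, hc, ih]

-- ===== VERDICT (by name: the statement is the Claim_ definition above) =====
theorem split_routes_from_path_py_spec : Claim_equal_split_routes_from_path_py := by
  intro p _
  show split_routes_from_path_py p = split_routes_from_path_py_alt p
  have h := pvFoldA_eq_goA p [] []
  simpa [split_routes_from_path_py, pvGoA_eq_alt] using h
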